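-- pv_equiv track=rewrite | github.com/georgek/bio-tools | sam-to-svg.py | cigar_to_aln_len
-- ===== SOURCE A (Python) =====
-- def cigar_to_aln_len(cigar):
--     current_number = ""
--     total_length = 0
--     for c in cigar:
--         if c in "0123456789":
--             current_number += c
--         elif c in "MD=X":
--             total_length += int(current_number)
--             current_number = ""
--         else:
--             current_number = ""
--     return total_length
-- ===== SOURCE B (Python) =====
-- import re
--
-- def cigar_to_aln_len(cigar):
--     total = 0
--     for m in re.finditer(r'(\d*)(\D)', cigar):
--         if m.group(2) in "MD=X":
--             total += int(m.group(1))
--     return total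
-- ===== Notes on version B (the rewrite author's own statement) =====
-- stated objective: idiomatic
-- what changed: Replaces the character-level accumulator state machine with regex tokenization: re.finditer(r'(\d*)(\D)') walks the CIGAR as (count, op) tokens and sums int(count) for ops in MD=X.
import Mathlib
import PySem

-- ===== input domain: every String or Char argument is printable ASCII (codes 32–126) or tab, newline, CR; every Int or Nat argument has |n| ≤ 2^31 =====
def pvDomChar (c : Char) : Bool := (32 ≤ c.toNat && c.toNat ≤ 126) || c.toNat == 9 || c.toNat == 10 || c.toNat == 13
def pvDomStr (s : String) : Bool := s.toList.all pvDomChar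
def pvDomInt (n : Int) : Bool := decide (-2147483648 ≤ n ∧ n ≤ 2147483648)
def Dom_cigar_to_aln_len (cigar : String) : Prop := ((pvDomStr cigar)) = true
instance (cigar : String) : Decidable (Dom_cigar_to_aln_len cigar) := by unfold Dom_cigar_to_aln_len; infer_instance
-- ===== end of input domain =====

-- B replaces A's character-level accumulator state machine with regex-style (count, op) tokenization; objective: idiomatic.

-- ===== PORT A =====
-- chars of "0123456789" / "MD=X", shared membership sets for the two ports
def pvDigitChars : List Char := "0123456789".toList
def pvOpChars : List Char := "MD=X".toList

def cigar_to_aln_len (cigar : String) : Int :=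
  -- state = (current_number as a list of chars, total_length); int() ported by PySem.Int.ofStr?
  -- (none = ValueError, excluded by Pre_; .getD 0 there is dead under Pre_)
  (cigar.toList.foldl
    (fun (st : List Char × Int) c =>
      if pvDigitChars.contains c then (st.1 ++ [c], st.2)
      else if pvOpChars.contains c then ([], st.2 + (PySem.Int.ofStr? (String.mk st.1)).getD 0)
      else ([], st.2))
    ([], 0)).2

-- ===== PORT B =====
-- regex-token walk of Source B: each re.finditer match is (maximal digit run, one non-digit char);
-- trailing digits with no following non-digit produce no match and are dropped.
def cigar_to_aln_len_alt_go (cs : List Char) (total : Int) : Int :=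
  match h : cs.dropWhile pvDigitChars.contains with
  | [] => total
  | op :: rest =>
      cigar_to_aln_len_alt_go rest
        (if pvOpChars.contains op then
           total + (PySem.Int.ofStr? (String.mk (cs.takeWhile pvDigitChars.contains))).getD 0
         else total)
termination_by cs.length
decreasing_by
  have h1 : (cs.dropWhile pvDigitChars.contains).length ≤ cs.length := List.length_dropWhile_le _ _
  rw [h] at h1; simp at h1; omega

def cigar_to_aln_len_alt (cigar : String) : Int :=
  cigar_to_aln_len_alt_go cigar.toList 0

-- ===== PRECONDITION & SPEC =====
-- Pre_ excludes exactly the inputs where Python A raises ValueError (an M/D/=/X op with no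
-- immediately preceding digit makes Python call int on an empty count string, which raises); Python B raises ValueError on exactly those inputs too.
def Pre_cigar_to_aln_len (cigar : String) : Prop :=
  ∀ i < cigar.toList.length,
    pvOpChars.contains (cigar.toList.getD i ' ') →
      1 ≤ i ∧ pvDigitChars.contains (cigar.toList.getD (i - 1) ' ')
instance (cigar : String) : Decidable (Pre_cigar_to_aln_len cigar) := by
  unfold Pre_cigar_to_aln_len; infer_instance
def pvWitness_cigar_to_aln_len : String := "10M2D1=3X5S"

def Spec_cigar_to_aln_len (cigar : String) (out : Int) : Prop := out = cigar_to_aln_len_alt cigar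
instance (cigar : String) (out : Int) : Decidable (Spec_cigar_to_aln_len cigar out) := by unfold Spec_cigar_to_aln_len; infer_instance

-- ===== CLAIM (what is proved, stated in full; the proofs are below) =====
def Claim_equal_cigar_to_aln_len : Prop := ∀ (cigar : String), Dom_cigar_to_aln_len cigar → Pre_cigar_to_aln_len cigar → Spec_cigar_to_aln_len cigar (cigar_to_aln_len cigar)

-- ===== LEMMAS AND PROOFS =====

-- unfold lemma for the well-founded token walk
theorem pv_go_eq (cs : List Char) (t : Int) :
    cigar_to_aln_len_alt_go cs t =
      match cs.dropWhile pvDigitChars.contains with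
      | [] => t
      | op :: rest =>
          cigar_to_aln_len_alt_go rest
            (if pvOpChars.contains op then
               t + (PySem.Int.ofStr? (String.mk (cs.takeWhile pvDigitChars.contains))).getD 0
             else t) := by
  rw [cigar_to_aln_len_alt_go]
  split <;> rename_i heq <;> rw [heq]

-- loop/token correspondence: A's foldl from state (ds, total), ds all digits,
-- computes B's token walk over ds ++ cs.
theorem pv_fold_eq_go (cs ds : List Char) (total : Int)
    (hds : ∀ d ∈ ds, pvDigitChars.contains d) :
    (cs.foldl
      (fun (st : List Char × Int) c =>
        if pvDigitChars.contains c then (st.1 ++ [c], st.2)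
        else if pvOpChars.contains c then ([], st.2 + (PySem.Int.ofStr? (String.mk st.1)).getD 0)
        else ([], st.2))
      (ds, total)).2
    = cigar_to_aln_len_alt_go (ds ++ cs) total := by
  induction cs generalizing ds total with
  | nil =>
      rw [List.append_nil, pv_go_eq, List.dropWhile_eq_nil_iff.mpr hds]
      rfl
  | cons c cs ih =>
      by_cases hd : pvDigitChars.contains c
      · have : ∀ d ∈ ds ++ [c], pvDigitChars.contains d := by
          intro d hmem; rcases List.mem_append.mp hmem with h | h
          · exact hds d h
          · simp at h; subst h; exact hd
        simp only [List.foldl_cons, if_pos hd]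
        rw [ih (ds ++ [c]) total this, List.append_assoc]
        rfl
      · have hd' : c ∉ pvDigitChars := by simpa using hd
        have hdrop : (ds ++ c :: cs).dropWhile pvDigitChars.contains = c :: cs := by
          rw [List.dropWhile_append]
          simp [List.dropWhile_cons, List.dropWhile_eq_nil_iff.mpr hds, hd']
        have htake : (ds ++ c :: cs).takeWhile pvDigitChars.contains = ds := by
          rw [List.takeWhile_append]
          simp [List.takeWhile_eq_self_iff.mpr hds,
                List.dropWhile_eq_nil_iff.mpr hds, List.takeWhile_cons, hd']
        rw [pv_go_eq, hdrop, htake]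
        by_cases hop : pvOpChars.contains c
        · simp only [List.foldl_cons, if_neg hd, if_pos hop]
          simpa using ih [] _ (by simp)
        · simp only [List.foldl_cons, if_neg hd, if_neg hop]
          simpa using ih [] _ (by simp)

-- ===== VERDICT (by name: the statement is the Claim_ definition above) =====
theorem cigar_to_aln_len_spec : Claim_equal_cigar_to_aln_len := by
  intro cigar _ _
  unfold Spec_cigar_to_aln_len cigar_to_aln_len cigar_to_aln_len_alt
  simpa using pv_fold_eq_go cigar.toList [] 0 (by simp)
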